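-- pv_equiv track=rewrite | github.com/nhatsmrt/AlgorithmPractice | LeetCode/1152. Analyze User Website Visit Pattern/Solution.py | mostVisitedPattern
-- ===== SOURCE A (Python) =====
-- from typing import List
--
-- def mostVisitedPattern(username: List[str], timestamp: List[int], website: List[str]) -> List[str]:
--     # Time Complexity: O(N^3)
--     # Space Complexity: O(N)
--
--     visits = sorted(list(zip(username, timestamp, website)), key=lambda visit: visit[1])
--
--     # group visit by person:
--     by_person = {}
--     for visit in visits:
--         if visit[0] not in by_person:
--             by_person[visit[0]] = []
--         by_person[visit[0]].append(visit[2])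
--
--     # count occurences of 3 sequences:
--     three_seq_cnt = {}
--     for person in by_person:
--         person_visit = by_person[person]
--         for i in range(len(person_visit) - 2):
--             for j in range(i + 1, len(person_visit) - 1):
--                 for k in range(j + 1, len(person_visit)):
--                     code = f"{person_visit[i]} {person_visit[j]} {person_visit[k]}"
--                     if code not in three_seq_cnt:
--                         three_seq_cnt[code] = set()
--                     three_seq_cnt[code].add(person)
--
--     # find the occurences of 3 sequences with highest count:
--     cur_max = 0
--     cur_seq = ""
--     for seq in three_seq_cnt:
--         if len(three_seq_cnt[seq]) > cur_max or \
--         (len(three_seq_cnt[seq]) == cur_max and seq < cur_seq):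
--             cur_max = len(three_seq_cnt[seq])
--             cur_seq = seq
--
--     return cur_seq.split(" ")
-- ===== SOURCE B (Python) =====
-- from typing import List
--
--
-- def _codes3(ws: List[str]) -> List[str]:
--     # One backward pass: maintain the suffix, all 2-codes of the suffix, and the
--     # chunk of 3-codes starting at each element, instead of three nested index loops.
--     suffix, pairs, chunks = [], [], []
--     for x in reversed(ws):
--         chunks.append([x + " " + p for p in pairs])
--         pairs = [x + " " + y for y in suffix] + pairs
--         suffix = [x] + suffix
--     out = []
--     for chunk in reversed(chunks):
--         out.extend(chunk)
--     return out
--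
--
-- def mostVisitedPattern(username: List[str], timestamp: List[int], website: List[str]) -> List[str]:
--     visits = sorted(zip(username, timestamp, website), key=lambda v: v[1])
--
--     by_person = {}
--     for u, _t, w in visits:
--         by_person.setdefault(u, []).append(w)
--
--     # count, per pattern code, the number of users who produced it (int counter,
--     # deduplicated per user, instead of a dict of user-sets)
--     counts = {}
--     for ws in by_person.values():
--         seen = set()
--         for code in _codes3(ws):
--             if code not in seen:
--                 seen.add(code)
--                 counts[code] = counts.get(code, 0) + 1
--
--     if not counts:
--         return [""]
--     best = min(counts, key=lambda s: (-counts[s], s))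
--     return best.split(" ")
-- ===== Notes on version B (the rewrite author's own statement) =====
-- stated objective: alternative
-- what changed: Triple patterns per user are generated by one backward pass that maintains the suffix, its 2-codes and its 3-codes (instead of three nested index loops), counting uses a per-user dedup plus a global int counter (instead of a dict of user-sets), and the answer is selected as min over the counter keyed by (-count, pattern).
import Mathlib
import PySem

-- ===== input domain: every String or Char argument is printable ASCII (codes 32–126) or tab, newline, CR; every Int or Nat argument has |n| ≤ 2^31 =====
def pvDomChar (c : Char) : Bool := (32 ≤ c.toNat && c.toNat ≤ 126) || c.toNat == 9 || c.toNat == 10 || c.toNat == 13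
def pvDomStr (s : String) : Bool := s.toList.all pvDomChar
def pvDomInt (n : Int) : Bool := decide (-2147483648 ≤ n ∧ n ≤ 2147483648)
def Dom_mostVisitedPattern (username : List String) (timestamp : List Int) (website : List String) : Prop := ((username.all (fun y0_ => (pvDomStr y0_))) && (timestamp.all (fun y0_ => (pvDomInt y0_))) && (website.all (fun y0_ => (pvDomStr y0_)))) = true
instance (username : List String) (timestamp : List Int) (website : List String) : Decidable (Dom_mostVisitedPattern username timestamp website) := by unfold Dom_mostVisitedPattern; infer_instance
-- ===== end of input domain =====

-- B generates each user's 3-patterns by one backward pass (suffix / 2-codes / 3-codes) and counts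
-- them in an int counter with per-user dedup, instead of A's three nested index loops into a dict
-- of user-sets; the answer is the first minimum under (-count, pattern). Same return value.

-- ===== PORT A =====
def mostVisitedPattern (username : List String) (timestamp : List Int) (website : List String) : List String :=
  let visits := PySem.List.sorted (username.zip (timestamp.zip website)) (fun v => v.2.1) false
  let by_person : PySem.Dict String (List String) :=
    visits.foldl (fun d v =>
      let d := if d.contains v.1 = false then d.insert v.1 [] else d
      d.modify v.1 [] (fun l => l ++ [v.2.2])) PySem.Dict.empty
  let cnt : PySem.Dict String (PySem.Set String) :=
    by_person.keys.foldl (fun d person =>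
      let pv := by_person.getD person []
      (PySem.List.pyRange 0 (PySem.List.len pv - 2)).foldl (fun d i =>
        (PySem.List.pyRange (i + 1) (PySem.List.len pv - 1)).foldl (fun d j =>
          (PySem.List.pyRange (j + 1) (PySem.List.len pv)).foldl (fun d k =>
            let code := PySem.List.pyGetD pv i "" ++ " " ++ PySem.List.pyGetD pv j "" ++ " " ++ PySem.List.pyGetD pv k ""
            let d := if d.contains code = false then d.insert code PySem.Set.empty else d
            d.modify code PySem.Set.empty (fun s => PySem.Set.add s person)) d) d) d) PySem.Dict.empty
  let best := cnt.keys.foldl (fun (b : Int × String) seq =>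
      let sz : Int := ((cnt.getD seq PySem.Set.empty).length : Int)
      if sz > b.1 ∨ (sz = b.1 ∧ seq < b.2) then (sz, seq) else b) ((0 : Int), "")
  (PySem.Str.split? best.2 " ").getD []

-- ===== PORT B =====
-- helper of Source B: one backward pass maintaining (suffix, 2-codes of suffix, chunks of 3-codes)
def pvCodes3 (ws : List String) : List String :=
  ((ws.foldr
    (fun x st =>
      (x :: st.1,
       st.1.map (fun y => x ++ " " ++ y) ++ st.2.1,
       st.2.2 ++ [st.2.1.map (fun p => x ++ " " ++ p)]))
    (([], [], []) : List String × List String × List (List String))).2.2).reverse.foldl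
    (fun out chunk => out ++ chunk) []

def mostVisitedPattern_alt (username : List String) (timestamp : List Int) (website : List String) : List String :=
  let visits := PySem.List.sorted (username.zip (timestamp.zip website)) (fun v => v.2.1) false
  let by_person : PySem.Dict String (List String) :=
    visits.foldl (fun d v => (d.setdefault v.1 []).modify v.1 [] (fun l => l ++ [v.2.2])) PySem.Dict.empty
  let counts : PySem.Dict String Int :=
    by_person.values.foldl (fun d ws =>
      ((pvCodes3 ws).foldl (fun (st : PySem.Set String × PySem.Dict String Int) code =>
          if code ∉ st.1 then (PySem.Set.add st.1 code, st.2.modify code 0 (· + 1)) else st)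
        (PySem.Set.empty, d)).2) PySem.Dict.empty
  match counts.items with
  | [] => [""]
  | it0 :: rest =>
    let best := rest.foldl (fun (b : String × Int) it =>
        if it.2 > b.2 ∨ (it.2 = b.2 ∧ it.1 < b.1) then it else b) it0
    (PySem.Str.split? best.1 " ").getD []

-- ===== PRECONDITION & SPEC =====
def Spec_mostVisitedPattern (username : List String) (timestamp : List Int) (website : List String) (out : List String) : Prop := out = mostVisitedPattern_alt username timestamp website
instance (username : List String) (timestamp : List Int) (website : List String) (out : List String) : Decidable (Spec_mostVisitedPattern username timestamp website out) := by unfold Spec_mostVisitedPattern; infer_instance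

-- ===== CLAIM (what is proved, stated in full; the proofs are below) =====
def Claim_equal_mostVisitedPattern : Prop := ∀ (username : List String) (timestamp : List Int) (website : List String), Dom_mostVisitedPattern username timestamp website → Spec_mostVisitedPattern username timestamp website (mostVisitedPattern username timestamp website)

-- ===== LEMMAS AND PROOFS =====

-- proof-side names for the pipeline stages of the two ports (each is definitionally the
-- corresponding stage of the port above)
def pvGroupA (visits : List (String × Int × String)) : PySem.Dict String (List String) :=
  visits.foldl (fun d v =>
    let d := if d.contains v.1 = false then d.insert v.1 [] else d
    d.modify v.1 [] (fun l => l ++ [v.2.2])) PySem.Dict.empty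

def pvGroupB (visits : List (String × Int × String)) : PySem.Dict String (List String) :=
  visits.foldl (fun d v => (d.setdefault v.1 []).modify v.1 [] (fun l => l ++ [v.2.2])) PySem.Dict.empty

def pvCntA (bp : PySem.Dict String (List String)) : PySem.Dict String (PySem.Set String) :=
  bp.keys.foldl (fun d person =>
    let pv := bp.getD person []
    (PySem.List.pyRange 0 (PySem.List.len pv - 2)).foldl (fun d i =>
      (PySem.List.pyRange (i + 1) (PySem.List.len pv - 1)).foldl (fun d j =>
        (PySem.List.pyRange (j + 1) (PySem.List.len pv)).foldl (fun d k =>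
          let code := PySem.List.pyGetD pv i "" ++ " " ++ PySem.List.pyGetD pv j "" ++ " " ++ PySem.List.pyGetD pv k ""
          let d := if d.contains code = false then d.insert code PySem.Set.empty else d
          d.modify code PySem.Set.empty (fun s => PySem.Set.add s person)) d) d) d) PySem.Dict.empty

def pvBestA (cnt : PySem.Dict String (PySem.Set String)) : Int × String :=
  cnt.keys.foldl (fun (b : Int × String) seq =>
    let sz : Int := ((cnt.getD seq PySem.Set.empty).length : Int)
    if sz > b.1 ∨ (sz = b.1 ∧ seq < b.2) then (sz, seq) else b) ((0 : Int), "")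

def pvStepB (st : PySem.Set String × PySem.Dict String Int) (code : String) : PySem.Set String × PySem.Dict String Int :=
  if code ∉ st.1 then (PySem.Set.add st.1 code, st.2.modify code 0 (· + 1)) else st

def pvCntB (bp : PySem.Dict String (List String)) : PySem.Dict String Int :=
  bp.values.foldl (fun d ws =>
    ((pvCodes3 ws).foldl (fun (st : PySem.Set String × PySem.Dict String Int) code =>
        if code ∉ st.1 then (PySem.Set.add st.1 code, st.2.modify code 0 (· + 1)) else st)
      (PySem.Set.empty, d)).2) PySem.Dict.empty

def pvSelB (items : List (String × Int)) : List String :=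
  match items with
  | [] => [""]
  | it0 :: rest =>
    let best := rest.foldl (fun (b : String × Int) it =>
        if it.2 > b.2 ∨ (it.2 = b.2 ∧ it.1 < b.1) then it else b) it0
    (PySem.Str.split? best.1 " ").getD []

def pvStepA (p : String) (d : PySem.Dict String (PySem.Set String)) (code : String) : PySem.Dict String (PySem.Set String) :=
  (if d.contains code = false then d.insert code PySem.Set.empty else d).modify code PySem.Set.empty (fun s => PySem.Set.add s p)

-- structural descriptions of the generated 2- and 3-codes
def pvPairsStr : List String → List String
  | [] => []
  | y :: r => r.map (fun z => y ++ " " ++ z) ++ pvPairsStr r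

def pvTriplesStr : List String → List String
  | [] => []
  | x :: r => (pvPairsStr r).map (fun p => x ++ " " ++ p) ++ pvTriplesStr r

def pvChunksOf : List String → List (List String)
  | [] => []
  | x :: r => pvChunksOf r ++ [(pvPairsStr r).map (fun p => x ++ " " ++ p)]

lemma pvCodes3_state (ws : List String) :
    (ws.foldr
      (fun x st =>
        (x :: st.1,
         st.1.map (fun y => x ++ " " ++ y) ++ st.2.1,
         st.2.2 ++ [st.2.1.map (fun p => x ++ " " ++ p)]))
      (([], [], []) : List String × List String × List (List String)))
    = (ws, pvPairsStr ws, pvChunksOf ws) := by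
  induction ws with
  | nil => rfl
  | cons x r ih => simp [List.foldr_cons, ih, pvPairsStr, pvChunksOf]

lemma pvChunksOf_flatten (ws : List String) : (pvChunksOf ws).reverse.flatten = pvTriplesStr ws := by
  induction ws with
  | nil => rfl
  | cons x r ih => simp [pvChunksOf, pvTriplesStr, ih]

lemma pvCodes3_eq (ws : List String) : pvCodes3 ws = pvTriplesStr ws := by
  unfold pvCodes3
  rw [pvCodes3_state, PySem.List.foldl_append_eq_flatten, pvChunksOf_flatten]
  rfl

lemma pvPairsStr_short (l : List String) (h : l.length ≤ 1) : pvPairsStr l = [] := by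
  match l, h with
  | [], _ => rfl
  | [y], _ => simp [pvPairsStr]

lemma pvTriplesStr_short (l : List String) (h : l.length ≤ 2) : pvTriplesStr l = [] := by
  match l, h with
  | [], _ => rfl
  | [x], _ => simp [pvTriplesStr, pvPairsStr]
  | [x, y], _ => simp [pvTriplesStr, pvPairsStr]

lemma pvGetD_drop (xs : List String) (a : Int) (ha : 0 ≤ a) (y : String) (r : List String)
    (hd : xs.drop a.toNat = y :: r) : PySem.List.pyGetD xs a "" = y := by
  have hlt : a.toNat < xs.length := by
    by_contra h
    rw [List.drop_eq_nil_of_le (by omega)] at hd; simp at hd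
  rw [PySem.List.pyGetD_eq_getElem xs "" ha (by omega)]
  have h0 : (xs.drop a.toNat)[0]'(by simp [hd]) = y := by simp [hd]
  rw [List.getElem_drop] at h0
  simpa using h0

-- A's inner double loop over j < k, started at j = a, is a fold over the 2-codes of the suffix
lemma pvPairLoop_eq {β : Type} (g : β → String → β) (xs : List String) :
    ∀ (n : Nat) (a : Int), 0 ≤ a → xs.length - a.toNat ≤ n → ∀ (d : β),
      List.foldl (fun d j =>
        List.foldl (fun d k => g d (PySem.List.pyGetD xs j "" ++ " " ++ PySem.List.pyGetD xs k ""))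
          d (PySem.List.pyRange (j + 1) (PySem.List.len xs)))
        d (PySem.List.pyRange a (PySem.List.len xs - 1))
      = (pvPairsStr (xs.drop a.toNat)).foldl g d := by
  intro n
  induction n with
  | zero =>
    intro a ha hn d
    have h1 : xs.length ≤ a.toNat := by omega
    rw [PySem.List.pyRange_one_eq_nil (by simp [PySem.List.len]; omega),
        List.drop_eq_nil_of_le h1]
    rfl
  | succ n ih =>
    intro a ha hn d
    by_cases hlt : a < PySem.List.len xs - 1
    · have hlen : (a : Int) < xs.length - 1 := by simpa [PySem.List.len] using hlt
      have hdrop : ∃ y r, xs.drop a.toNat = y :: r := by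
        have : a.toNat < xs.length := by omega
        cases h : xs.drop a.toNat with
        | nil => exfalso; have := List.length_drop (l := xs) (i := a.toNat); rw [h] at this; simp at this; omega
        | cons y r => exact ⟨y, r, rfl⟩
      obtain ⟨y, r, hd⟩ := hdrop
      have hy : PySem.List.pyGetD xs a "" = y := pvGetD_drop xs a ha y r hd
      have hr : xs.drop (a.toNat + 1) = r := by
        rw [← List.drop_drop, hd]; simp
      rw [PySem.List.pyRange_one_cons hlt, List.foldl_cons]
      rw [PySem.List.foldl_pyRange_pyGetD xs "" (fun acc z => g acc (PySem.List.pyGetD xs a "" ++ " " ++ z)) d (by omega : (0:Int) ≤ a + 1)]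
      have ha1 : (a + 1).toNat = a.toNat + 1 := by omega
      rw [ha1, hr, hy]
      rw [ih (a + 1) (by omega) (by omega)]
      rw [ha1, hr, hd]
      show _ = (pvPairsStr (y :: r)).foldl g d
      rw [pvPairsStr, List.foldl_append, List.foldl_map]
    · rw [PySem.List.pyRange_one_eq_nil (by omega)]
      have : (xs.drop a.toNat).length ≤ 1 := by
        rw [List.length_drop]
        simp [PySem.List.len] at hlt
        omega
      rw [pvPairsStr_short _ this]
      rfl

-- A's triple loop over i < j < k, started at i = a, is a fold over the 3-codes of the suffix
lemma pvTripleLoop_eq {β : Type} (g : β → String → β) (xs : List String) :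
    ∀ (n : Nat) (a : Int), 0 ≤ a → xs.length - a.toNat ≤ n → ∀ (d : β),
      List.foldl (fun d i =>
        List.foldl (fun d j =>
          List.foldl (fun d k =>
            g d (PySem.List.pyGetD xs i "" ++ " " ++ (PySem.List.pyGetD xs j "" ++ " " ++ PySem.List.pyGetD xs k "")))
            d (PySem.List.pyRange (j + 1) (PySem.List.len xs)))
          d (PySem.List.pyRange (i + 1) (PySem.List.len xs - 1)))
        d (PySem.List.pyRange a (PySem.List.len xs - 2))
      = (pvTriplesStr (xs.drop a.toNat)).foldl g d := by
  intro n
  induction n with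
  | zero =>
    intro a ha hn d
    have h1 : xs.length ≤ a.toNat := by omega
    rw [PySem.List.pyRange_one_eq_nil (by simp [PySem.List.len]; omega),
        List.drop_eq_nil_of_le h1]
    rfl
  | succ n ih =>
    intro a ha hn d
    by_cases hlt : a < PySem.List.len xs - 2
    · have hlen : (a : Int) < xs.length - 2 := by simpa [PySem.List.len] using hlt
      have hdrop : ∃ y r, xs.drop a.toNat = y :: r := by
        have : a.toNat < xs.length := by omega
        cases h : xs.drop a.toNat with
        | nil => exfalso; have := List.length_drop (l := xs) (i := a.toNat); rw [h] at this; simp at this; omega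
        | cons y r => exact ⟨y, r, rfl⟩
      obtain ⟨y, r, hd⟩ := hdrop
      have hy : PySem.List.pyGetD xs a "" = y := pvGetD_drop xs a ha y r hd
      have ha1 : (a + 1).toNat = a.toNat + 1 := by omega
      have hr : xs.drop (a.toNat + 1) = r := by
        rw [← List.drop_drop, hd]; simp
      rw [PySem.List.pyRange_one_cons hlt, List.foldl_cons]
      rw [pvPairLoop_eq (fun d p => g d (PySem.List.pyGetD xs a "" ++ " " ++ p)) xs (xs.length - (a+1).toNat) (a+1) (by omega) (by omega)]
      rw [ha1, hr, hy]
      rw [ih (a + 1) (by omega) (by omega)]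
      rw [ha1, hr, hd]
      show _ = (pvTriplesStr (y :: r)).foldl g d
      rw [pvTriplesStr, List.foldl_append, List.foldl_map]
    · rw [PySem.List.pyRange_one_eq_nil (by omega)]
      have : (xs.drop a.toNat).length ≤ 2 := by
        rw [List.length_drop]
        simp [PySem.List.len] at hlt
        omega
      rw [pvTriplesStr_short _ this]
      rfl

lemma pvStepA_getD (p code c : String) (d : PySem.Dict String (PySem.Set String)) :
    (pvStepA p d code).getD c PySem.Set.empty
    = if c = code then PySem.Set.add (d.getD code PySem.Set.empty) p else d.getD c PySem.Set.empty := by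
  unfold pvStepA
  by_cases h : d.contains code = false
  · rw [if_pos h, PySem.Dict.getD_modify]
    by_cases hc : c = code
    · simp [hc, PySem.Dict.getD_insert_self, PySem.Dict.getD_of_not_contains d _ h]
    · simp [hc, PySem.Dict.getD_insert]
  · rw [if_neg h, PySem.Dict.getD_modify]

lemma pvStepA_keys (p code : String) (d : PySem.Dict String (PySem.Set String)) :
    (pvStepA p d code).keys = if d.contains code then d.keys else d.keys ++ [code] := by
  unfold pvStepA
  by_cases h : d.contains code = false
  · rw [if_pos h, PySem.Dict.keys_modify, PySem.Dict.keys_insert_of_contains _ _ (PySem.Dict.contains_insert_self d code _),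
        PySem.Dict.keys_insert_of_not_contains d _ h, h]
    simp
  · have h' : d.contains code = true := by revert h; cases d.contains code <;> simp
    rw [if_neg h, PySem.Dict.keys_modify, PySem.Dict.keys_insert_of_contains _ _ h', h']
    simp

lemma pvSetAdd_of_mem {s : PySem.Set String} {x : String} (h : x ∈ s) : PySem.Set.add s x = s := by
  simp [PySem.Set.add, h]

lemma pvSetAdd_len_of_not_mem {s : PySem.Set String} {x : String} (h : x ∉ s) :
    (PySem.Set.add s x).length = s.length + 1 := by
  simp [PySem.Set.add, h]

-- one counting step preserves the cross-implementation invariant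
lemma pvCnt_step (p code : String) (dA : PySem.Dict String (PySem.Set String))
    (seen : PySem.Set String) (dB : PySem.Dict String Int)
    (hkeys : dA.keys = dB.keys)
    (hsz : ∀ c, ((dA.getD c PySem.Set.empty).length : Int) = dB.getD c 0)
    (hmem : ∀ c, p ∈ dA.getD c PySem.Set.empty ↔ c ∈ seen)
    (hnd : dA.keys.Nodup)
    (hpos : ∀ c ∈ dB.keys, 1 ≤ dB.getD c 0) :
    (pvStepA p dA code).keys = (pvStepB (seen, dB) code).2.keys
    ∧ (∀ c, (((pvStepA p dA code).getD c PySem.Set.empty).length : Int) = (pvStepB (seen, dB) code).2.getD c 0)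
    ∧ (∀ c, p ∈ (pvStepA p dA code).getD c PySem.Set.empty ↔ c ∈ (pvStepB (seen, dB) code).1)
    ∧ (pvStepA p dA code).keys.Nodup
    ∧ (∀ c ∈ (pvStepB (seen, dB) code).2.keys, 1 ≤ (pvStepB (seen, dB) code).2.getD c 0)
    ∧ (∀ c q, q ∈ (pvStepA p dA code).getD c PySem.Set.empty → q ∈ dA.getD c PySem.Set.empty ∨ q = p) := by
  have hcont : dA.contains code = dB.contains code := by
    cases hA : dA.contains code <;> cases hB : dB.contains code <;> try rfl
    · exfalso
      rw [PySem.Dict.contains_iff_mem_keys, ← hkeys, ← PySem.Dict.contains_iff_mem_keys, hA] at hB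
      simp at hB
    · exfalso
      rw [PySem.Dict.contains_iff_mem_keys, hkeys, ← PySem.Dict.contains_iff_mem_keys, hB] at hA
      simp at hA
  by_cases hseen : code ∈ seen
  · -- B skips; A adds p to a set already containing it
    have hB : pvStepB (seen, dB) code = (seen, dB) := by simp [pvStepB, hseen]
    have hpA : p ∈ dA.getD code PySem.Set.empty := (hmem code).2 hseen
    have hAget : ∀ c, (pvStepA p dA code).getD c PySem.Set.empty = dA.getD c PySem.Set.empty := by
      intro c
      rw [pvStepA_getD]
      by_cases hc : c = code
      · rw [if_pos hc, pvSetAdd_of_mem hpA, hc]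
      · rw [if_neg hc]
    have hcontA : dA.contains code = true := by
      by_contra h
      have h' : dA.contains code = false := by revert h; cases dA.contains code <;> simp
      rw [PySem.Dict.getD_of_not_contains dA _ h'] at hpA
      simp [PySem.Set.empty] at hpA
    have hAkeys : (pvStepA p dA code).keys = dA.keys := by rw [pvStepA_keys, if_pos hcontA]
    rw [hB, hAkeys]
    refine ⟨hkeys, ?_, ?_, hnd, hpos, ?_⟩
    · intro c; rw [hAget]; exact hsz c
    · intro c; rw [hAget]; exact hmem c
    · intro c q hq; rw [hAget] at hq; exact Or.inl hq
  · -- B counts; A's set at `code` grows by p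
    have hpA : p ∉ dA.getD code PySem.Set.empty := fun h => hseen ((hmem code).1 h)
    have hB : pvStepB (seen, dB) code = (PySem.Set.add seen code, dB.modify code 0 (· + 1)) := by
      simp [pvStepB, hseen]
    rw [hB]
    refine ⟨?_, ?_, ?_, ?_, ?_, ?_⟩
    · rw [pvStepA_keys, PySem.Dict.keys_modify]
      by_cases h : dB.contains code = true
      · rw [PySem.Dict.keys_insert_of_contains _ _ h, if_pos (by rw [hcont]; exact h), hkeys]
      · have h' : dB.contains code = false := by revert h; cases dB.contains code <;> simp
        rw [PySem.Dict.keys_insert_of_not_contains _ _ h', if_neg (by rw [hcont, h']; simp), hkeys]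
    · intro c
      rw [pvStepA_getD, PySem.Dict.getD_modify]
      by_cases hc : c = code
      · rw [if_pos hc, if_pos hc, pvSetAdd_len_of_not_mem hpA, ← hsz code]
        push_cast; ring
      · rw [if_neg hc, if_neg hc]; exact hsz c
    · intro c
      rw [pvStepA_getD]
      by_cases hc : c = code
      · subst hc
        rw [if_pos rfl, PySem.Set.mem_add, PySem.Set.mem_add]
        simp
      · rw [if_neg hc, PySem.Set.mem_add, hmem c]
        constructor
        · intro h; exact Or.inl h
        · rintro (h | h)
          · exact h
          · exact absurd h hc
    · rw [pvStepA_keys]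
      by_cases h : dA.contains code = true
      · rw [if_pos h]; exact hnd
      · have h' : dA.contains code = false := by revert h; cases dA.contains code <;> simp
        rw [if_neg (by rw [h']; simp)]
        have : code ∉ dA.keys := by
          intro hm
          rw [← PySem.Dict.contains_iff_mem_keys] at hm
          rw [h'] at hm; simp at hm
        simp [List.nodup_append, hnd]
        intro a ha heq
        subst heq
        exact this ha
    · intro c hc
      rw [PySem.Dict.getD_modify]
      by_cases hcc : c = code
      · rw [if_pos hcc]
        by_cases h : dB.contains code = true
        · have := hpos code (by rwa [← PySem.Dict.contains_iff_mem_keys])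
          omega
        · have h' : dB.contains code = false := by revert h; cases dB.contains code <;> simp
          rw [PySem.Dict.getD_of_not_contains dB _ h']
          omega
      · rw [if_neg hcc]
        apply hpos
        rw [PySem.Dict.keys_modify] at hc
        by_cases h : dB.contains code = true
        · rwa [PySem.Dict.keys_insert_of_contains _ _ h] at hc
        · have h' : dB.contains code = false := by revert h; cases dB.contains code <;> simp
          rw [PySem.Dict.keys_insert_of_not_contains _ _ h'] at hc
          rcases List.mem_append.1 hc with h1 | h1
          · exact h1
          · simp at h1; exact absurd h1 hcc
    · intro c q hq
      rw [pvStepA_getD] at hq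
      by_cases hc : c = code
      · rw [if_pos hc] at hq
        rcases (PySem.Set.mem_add _ _ _).1 hq with h | h
        · left; rwa [hc]
        · right; exact h
      · rw [if_neg hc] at hq; exact Or.inl hq

-- one user's whole code list preserves the invariant
lemma pvCnt_fold (p : String) (codes : List String) :
    ∀ (dA : PySem.Dict String (PySem.Set String)) (seen : PySem.Set String) (dB : PySem.Dict String Int),
      dA.keys = dB.keys →
      (∀ c, ((dA.getD c PySem.Set.empty).length : Int) = dB.getD c 0) →
      (∀ c, p ∈ dA.getD c PySem.Set.empty ↔ c ∈ seen) →
      dA.keys.Nodup →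
      (∀ c ∈ dB.keys, 1 ≤ dB.getD c 0) →
      (codes.foldl (pvStepA p) dA).keys = (codes.foldl pvStepB (seen, dB)).2.keys
      ∧ (∀ c, (((codes.foldl (pvStepA p) dA).getD c PySem.Set.empty).length : Int) = (codes.foldl pvStepB (seen, dB)).2.getD c 0)
      ∧ (codes.foldl (pvStepA p) dA).keys.Nodup
      ∧ (∀ c ∈ (codes.foldl pvStepB (seen, dB)).2.keys, 1 ≤ (codes.foldl pvStepB (seen, dB)).2.getD c 0)
      ∧ (∀ c q, q ∈ (codes.foldl (pvStepA p) dA).getD c PySem.Set.empty → q ∈ dA.getD c PySem.Set.empty ∨ q = p) := by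
  induction codes with
  | nil =>
    intro dA seen dB hkeys hsz hmem hnd hpos
    exact ⟨hkeys, hsz, hnd, hpos, fun c q h => Or.inl h⟩
  | cons code rest ih =>
    intro dA seen dB hkeys hsz hmem hnd hpos
    obtain ⟨k1, s1, m1, n1, p1, g1⟩ := pvCnt_step p code dA seen dB hkeys hsz hmem hnd hpos
    rw [List.foldl_cons, List.foldl_cons]
    obtain ⟨K, S, N, P, G⟩ := ih (pvStepA p dA code) (pvStepB (seen, dB) code).1 (pvStepB (seen, dB) code).2 k1 s1 m1 n1 p1
    refine ⟨K, S, N, P, ?_⟩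
    intro c q hq
    rcases G c q hq with h | h
    · exact g1 c q h
    · exact Or.inr h

-- the loop over users preserves the invariant globally
lemma pvPersons_fold (codes : String → List String) :
    ∀ (persons : List String) (dA : PySem.Dict String (PySem.Set String)) (dB : PySem.Dict String Int),
      persons.Nodup →
      dA.keys = dB.keys →
      (∀ c, ((dA.getD c PySem.Set.empty).length : Int) = dB.getD c 0) →
      dA.keys.Nodup →
      (∀ c ∈ dB.keys, 1 ≤ dB.getD c 0) →
      (∀ c p, p ∈ persons → p ∉ dA.getD c PySem.Set.empty) →
      (persons.foldl (fun d person => (codes person).foldl (pvStepA person) d) dA).keys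
        = (persons.foldl (fun d person => ((codes person).foldl pvStepB (PySem.Set.empty, d)).2) dB).keys
      ∧ (∀ c, (((persons.foldl (fun d person => (codes person).foldl (pvStepA person) d) dA).getD c PySem.Set.empty).length : Int)
          = (persons.foldl (fun d person => ((codes person).foldl pvStepB (PySem.Set.empty, d)).2) dB).getD c 0)
      ∧ (persons.foldl (fun d person => (codes person).foldl (pvStepA person) d) dA).keys.Nodup
      ∧ (∀ c ∈ (persons.foldl (fun d person => ((codes person).foldl pvStepB (PySem.Set.empty, d)).2) dB).keys,
          1 ≤ (persons.foldl (fun d person => ((codes person).foldl pvStepB (PySem.Set.empty, d)).2) dB).getD c 0)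
      ∧ (∀ c q, q ∈ (persons.foldl (fun d person => (codes person).foldl (pvStepA person) d) dA).getD c PySem.Set.empty
          → q ∈ dA.getD c PySem.Set.empty ∨ q ∈ persons) := by
  intro persons
  induction persons with
  | nil =>
    intro dA dB _ hkeys hsz hnd hpos _
    exact ⟨hkeys, hsz, hnd, hpos, fun c q h => Or.inl h⟩
  | cons p ps ih =>
    intro dA dB hndp hkeys hsz hnd hpos hfresh
    rw [List.foldl_cons, List.foldl_cons]
    have hmem0 : ∀ c, p ∈ dA.getD c PySem.Set.empty ↔ c ∈ (PySem.Set.empty : PySem.Set String) := by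
      intro c
      simp [PySem.Set.empty]
      exact hfresh c p (by simp)
    obtain ⟨k1, s1, n1, p1, g1⟩ := pvCnt_fold p (codes p) dA PySem.Set.empty dB hkeys hsz hmem0 hnd hpos
    have hndp' : ps.Nodup := (List.nodup_cons.1 hndp).2
    have hpns : p ∉ ps := (List.nodup_cons.1 hndp).1
    have hfresh' : ∀ c q, q ∈ ps → q ∉ ((codes p).foldl (pvStepA p) dA).getD c PySem.Set.empty := by
      intro c q hq hin
      rcases g1 c q hin with h | h
      · exact hfresh c q (by simp [hq]) h
      · subst h; exact hpns hq
    obtain ⟨K, S, N, P, G⟩ := ih ((codes p).foldl (pvStepA p) dA) (((codes p).foldl pvStepB (PySem.Set.empty, dB)).2)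
      hndp' k1 s1 n1 p1 hfresh'
    refine ⟨K, S, N, P, ?_⟩
    intro c q hq
    rcases G c q hq with h | h
    · rcases g1 c q h with h2 | h2
      · exact Or.inl h2
      · exact Or.inr (by simp [h2])
    · exact Or.inr (by simp [h])

-- grouping: A's if/insert step equals B's setdefault step
lemma pvGroup_step_eq (d : PySem.Dict String (List String)) (v : String × Int × String) :
    (let d' := if d.contains v.1 = false then d.insert v.1 [] else d
     d'.modify v.1 [] (fun l => l ++ [v.2.2]))
    = (d.setdefault v.1 []).modify v.1 [] (fun l => l ++ [v.2.2]) := by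
  show (if d.contains v.1 = false then d.insert v.1 [] else d).modify v.1 [] (fun l => l ++ [v.2.2]) = _
  by_cases h : d.contains v.1 = false
  · rw [if_pos h, PySem.Dict.setdefault_of_not_contains d _ h]
  · have h' : d.contains v.1 = true := by revert h; cases d.contains v.1 <;> simp
    rw [if_neg h, PySem.Dict.setdefault_of_contains d _ h']

lemma pvGroup_eq (visits : List (String × Int × String)) : pvGroupA visits = pvGroupB visits := by
  unfold pvGroupA pvGroupB
  apply PySem.List.foldl_congr_mem'
  intro v _ d
  exact pvGroup_step_eq d v

lemma pvGroup_nodup (visits : List (String × Int × String)) : (pvGroupA visits).keys.Nodup := by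
  unfold pvGroupA
  suffices h : ∀ (d : PySem.Dict String (List String)), d.keys.Nodup →
      (visits.foldl (fun d v =>
        let d := if d.contains v.1 = false then d.insert v.1 [] else d
        d.modify v.1 [] (fun l => l ++ [v.2.2])) d).keys.Nodup by
    exact h PySem.Dict.empty (by simp [PySem.Dict.keys_empty])
  induction visits with
  | nil => intro d hd; simpa using hd
  | cons v vs ih =>
    intro d hd
    rw [List.foldl_cons]
    apply ih
    show ((if d.contains v.1 = false then d.insert v.1 [] else d).modify v.1 [] (fun l => l ++ [v.2.2])).keys.Nodup
    rw [PySem.Dict.keys_modify]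
    apply PySem.Dict.nodup_keys_insert
    by_cases h : d.contains v.1 = false
    · rw [if_pos h]; exact PySem.Dict.nodup_keys_insert _ _ _ hd
    · rw [if_neg h]; exact hd

-- the two counting dicts have the same keys, sizes = counts, keys without duplicates, counts ≥ 1
lemma pvCnt_main (bp : PySem.Dict String (List String)) (hbnd : bp.keys.Nodup) :
    (pvCntA bp).keys = (pvCntB bp).keys
    ∧ (∀ c, (((pvCntA bp).getD c PySem.Set.empty).length : Int) = (pvCntB bp).getD c 0)
    ∧ (pvCntA bp).keys.Nodup
    ∧ (∀ c ∈ (pvCntB bp).keys, 1 ≤ (pvCntB bp).getD c 0) := by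
  have hA : pvCntA bp = bp.keys.foldl (fun d person => (pvCodes3 (bp.getD person [])).foldl (pvStepA person) d) PySem.Dict.empty := by
    unfold pvCntA
    apply PySem.List.foldl_congr_mem'
    intro person _ d
    rw [pvCodes3_eq]
    have h := pvTripleLoop_eq (pvStepA person) (bp.getD person []) (bp.getD person []).length 0 le_rfl (by simp)
    simp only [Int.toNat_zero, List.drop_zero] at h
    rw [← h]
    apply PySem.List.foldl_congr_mem'
    intro i _ acc
    apply PySem.List.foldl_congr_mem'
    intro j _ acc2
    apply PySem.List.foldl_congr_mem'
    intro k _ acc3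
    simp [pvStepA, String.append_assoc]
  have hB : pvCntB bp = bp.keys.foldl (fun d person => ((pvCodes3 (bp.getD person [])).foldl pvStepB (PySem.Set.empty, d)).2) PySem.Dict.empty := by
    unfold pvCntB
    rw [PySem.Dict.values_eq_map_keys bp hbnd [], List.foldl_map]
    rfl
  rw [hA, hB]
  obtain ⟨K, S, N, P, _⟩ := pvPersons_fold (fun person => pvCodes3 (bp.getD person []))
    bp.keys PySem.Dict.empty PySem.Dict.empty hbnd
    (by simp [PySem.Dict.keys_empty])
    (by intro c; simp [PySem.Dict.getD_empty, PySem.Set.empty])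
    (by simp [PySem.Dict.keys_empty])
    (by simp [PySem.Dict.keys_empty])
    (by intro c p _; simp [PySem.Dict.getD_empty, PySem.Set.empty])
  exact ⟨K, S, N, P⟩

-- selection: B's min-fold over the items is A's running-best fold over the keys, swapped
lemma pvSel_fold (f : String → Int) :
    ∀ (l : List String) (b : String × Int),
      (l.map (fun k => (k, f k))).foldl
        (fun (b : String × Int) it => if it.2 > b.2 ∨ (it.2 = b.2 ∧ it.1 < b.1) then it else b) b
      = ((l.foldl (fun (b : Int × String) seq =>
            if f seq > b.1 ∨ (f seq = b.1 ∧ seq < b.2) then (f seq, seq) else b) (b.2, b.1)).2,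
         (l.foldl (fun (b : Int × String) seq =>
            if f seq > b.1 ∨ (f seq = b.1 ∧ seq < b.2) then (f seq, seq) else b) (b.2, b.1)).1) := by
  intro l
  induction l with
  | nil => intro b; rfl
  | cons k kr ih =>
    intro b
    rw [List.map_cons, List.foldl_cons, List.foldl_cons]
    have h1 : (if f k > b.2 ∨ (f k = b.2 ∧ k < b.1) then ((k, f k) : String × Int) else b)
         = (((if f k > b.2 ∨ (f k = b.2 ∧ k < b.1) then ((f k, k) : Int × String) else (b.2, b.1)).2),
            ((if f k > b.2 ∨ (f k = b.2 ∧ k < b.1) then ((f k, k) : Int × String) else (b.2, b.1)).1)) := by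
      split_ifs <;> rfl
    rw [h1, ih]

lemma pvSel_main (cntA : PySem.Dict String (PySem.Set String)) (cntB : PySem.Dict String Int)
    (hK : cntA.keys = cntB.keys)
    (hS : ∀ c, ((cntA.getD c PySem.Set.empty).length : Int) = cntB.getD c 0)
    (hN : cntA.keys.Nodup)
    (hP : ∀ c ∈ cntB.keys, 1 ≤ cntB.getD c 0) :
    (PySem.Str.split? (pvBestA cntA).2 " ").getD [] = pvSelB cntB.items := by
  have hitems : cntB.items = cntA.keys.map (fun k => (k, cntB.getD k 0)) := by
    rw [PySem.Dict.items_eq_map_keys cntB (hK ▸ hN) 0, hK]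
  have hbest : pvBestA cntA = cntA.keys.foldl (fun (b : Int × String) seq =>
      if cntB.getD seq 0 > b.1 ∨ (cntB.getD seq 0 = b.1 ∧ seq < b.2) then (cntB.getD seq 0, seq) else b) ((0 : Int), "") := by
    unfold pvBestA
    apply PySem.List.foldl_congr_mem'
    intro seq _ b
    simp only [hS]
  cases hks : cntA.keys with
  | nil =>
    rw [hitems, hks]
    rw [hbest, hks]
    rfl
  | cons k0 kr =>
    have hf0 : 1 ≤ cntB.getD k0 0 := hP k0 (by rw [← hK, hks]; simp)
    rw [hitems, hks, List.map_cons]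
    rw [hbest, hks, List.foldl_cons]
    rw [if_pos (Or.inl (by omega))]
    show _ = (PySem.Str.split? ((kr.map (fun k => (k, cntB.getD k 0))).foldl
        (fun (b : String × Int) it => if it.2 > b.2 ∨ (it.2 = b.2 ∧ it.1 < b.1) then it else b)
        (k0, cntB.getD k0 0)).1 " ").getD []
    rw [pvSel_fold (fun k => cntB.getD k 0) kr (k0, cntB.getD k0 0)]

-- the whole pipelines agree
lemma pvPipe_eq (visits : List (String × Int × String)) :
    (PySem.Str.split? (pvBestA (pvCntA (pvGroupA visits))).2 " ").getD []
    = pvSelB ((pvCntB (pvGroupB visits)).items) := by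
  rw [← pvGroup_eq visits]
  obtain ⟨K, S, N, P⟩ := pvCnt_main (pvGroupA visits) (pvGroup_nodup visits)
  exact pvSel_main _ _ K S N P

-- ===== VERDICT (by name: the statement is the Claim_ definition above) =====
theorem mostVisitedPattern_spec : Claim_equal_mostVisitedPattern := by
  intro username timestamp website _
  show mostVisitedPattern username timestamp website = mostVisitedPattern_alt username timestamp website
  exact pvPipe_eq (PySem.List.sorted (username.zip (timestamp.zip website)) (fun v => v.2.1) false)
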